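-- pv_equiv track=rewrite | github.com/agruber/insect-pol-iii | scripts/generate_short_names.py | make_unique_short_names
-- ===== SOURCE A (Python) =====
-- def make_unique_short_names(species_list):
--     """Generate unique short names - first come, first served with shortest names."""
--     name_mapping = {}
--     used_names = set()
--
--     for species in species_list:
--         parts = species.strip().split()
--         if len(parts) < 2:
--             continue
--
--         genus = parts[0]
--         species_epithet = parts[1]
--         genus_short = genus[:3].capitalize()
--
--         # Try progressively longer species names until we find one that's not used
--         for species_len in range(3, len(species_epithet) + 1):
--             species_short = species_epithet[:species_len].lower()
--             candidate_name = f"{genus_short}_{species_short}"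
--
--             if candidate_name not in used_names:
--                 name_mapping[species] = candidate_name
--                 used_names.add(candidate_name)
--                 break
--         else:
--             # Fallback: use full name with number suffix if needed
--             base_name = f"{genus_short}_{species_epithet.lower()}"
--             if base_name not in used_names:
--                 name_mapping[species] = base_name
--                 used_names.add(base_name)
--             else:
--                 counter = 1
--                 while f"{base_name}_{counter}" in used_names:
--                     counter += 1
--                 final_name = f"{base_name}_{counter}"
--                 name_mapping[species] = final_name
--                 used_names.add(final_name)
--
--     return name_mapping
-- ===== SOURCE B (Python) =====
-- def make_unique_short_names(species_list):
--     """Generate unique short names - first come, first served with shortest names."""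
--     name_mapping = {}
--     used_names = set()
--
--     for species in species_list:
--         parts = species.strip().split()
--         if len(parts) < 2:
--             continue
--
--         genus_short = parts[0][:3].capitalize()
--         epithet = parts[1]
--         base = f"{genus_short}_{epithet.lower()}"
--
--         # Batch computation: build the whole option set (all prefix abbreviations
--         # plus the full base name), subtract the used names, and take the shortest
--         # survivor.  Only if every option is taken do we number the base name,
--         # choosing the smallest free suffix from a bounded range.
--         options = {f"{genus_short}_{epithet[:n].lower()}" for n in range(3, len(epithet) + 1)}
--         options.add(base)
--         free = options - used_names
--         if free:
--             name = min(free, key=len)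
--         else:
--             name = base + "_" + str(min(
--                 k for k in range(1, len(used_names) + 2)
--                 if f"{base}_{k}" not in used_names))
--
--         name_mapping[species] = name
--         used_names.add(name)
--
--     return name_mapping
-- ===== Notes on version B (the rewrite author's own statement) =====
-- stated objective: alternative
-- what changed: A's three-stage sequential trial (inner for/else over growing prefixes with break, explicit base-name check, unbounded counter while-loop) is replaced by a batch set computation: build the whole option set via a set comprehension, subtract used_names, and take min(free, key=len); only when every option is taken is the base name numbered, with the smallest free suffix chosen by min over a bounded range.
import Mathlib
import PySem

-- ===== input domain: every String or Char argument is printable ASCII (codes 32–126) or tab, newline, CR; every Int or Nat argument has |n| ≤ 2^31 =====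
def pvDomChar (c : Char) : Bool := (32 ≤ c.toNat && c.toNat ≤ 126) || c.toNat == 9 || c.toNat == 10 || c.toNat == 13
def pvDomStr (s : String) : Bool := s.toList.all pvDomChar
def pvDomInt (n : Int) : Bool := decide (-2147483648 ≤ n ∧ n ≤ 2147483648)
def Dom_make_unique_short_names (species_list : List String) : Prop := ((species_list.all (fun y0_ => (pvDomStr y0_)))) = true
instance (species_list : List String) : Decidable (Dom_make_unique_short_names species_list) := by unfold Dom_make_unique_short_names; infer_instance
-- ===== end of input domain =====

-- B replaces A's three-stage sequential trial (inner for/else over prefix lengths, explicit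
-- base-name check, counter while-loop) by a batch computation: build the whole option set,
-- subtract the used names, take the shortest survivor (min by length), and number the base
-- name from a bounded range only when every option is taken; same return value, objective: alternative.

-- ===== PORT A =====

-- genus[:3].capitalize(): first char upper-cased, rest lower-cased — exact on the ASCII domain
-- (Python title-cases the first char, which equals upper-casing for ASCII).
def pvCapitalize (cs : List Char) : List Char :=
  match cs with
  | [] => []
  | c :: rest => PySem.Chars.upperChar c :: PySem.Chars.lower rest

-- f"{genus_short}_{s}"
def pvJoinName (gs : List Char) (s : List Char) : String := String.ofList (gs ++ '_' :: s)

-- the inner 'for species_len in range(3, len(species_epithet)+1): ... break / else' loop of A: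
-- some = the first unused candidate (break), none = the loop fell through to its else branch
def pvTryA (gs ep : List Char) (used : PySem.Set String) : List Int → Option String
  | [] => none
  | L :: Ls =>
    let cand := pvJoinName gs (PySem.Chars.lower (PySem.Chars.slice ep none (some L)))
    if PySem.Set.contains used cand then pvTryA gs ep used Ls else some cand

-- A's 'counter = 1; while f"{base_name}_{counter}" in used_names: counter += 1' loop, with fuel;
-- fuel used_names.length + 1 always suffices (the numbered candidates are pairwise distinct
-- strings), so the fuel-exhausted value is never reached on any input.
def pvCounterA (used : PySem.Set String) (base : List Char) (c : Nat) : Nat → String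
  | 0 => String.ofList (base ++ '_' :: PySem.Int.toChars (c : Int))
  | fuel + 1 =>
    let cand := String.ofList (base ++ '_' :: PySem.Int.toChars (c : Int))
    if PySem.Set.contains used cand then pvCounterA used base (c + 1) fuel else cand

-- one iteration of A's main 'for species in species_list' loop over the state (name_mapping, used_names)
def pvStepA (st : PySem.Dict String String × PySem.Set String) (species : String) :
    PySem.Dict String String × PySem.Set String :=
  let parts := PySem.Str.split₀ (PySem.Str.strip species)
  if parts.length < 2 then st
  else
    let genus := parts.getD 0 ""
    let ep := (parts.getD 1 "").toList
    let gs := pvCapitalize (PySem.Chars.slice genus.toList none (some 3))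
    match pvTryA gs ep st.2 (PySem.List.pyRange 3 (ep.length + 1) 1) with
    | some cand => (st.1.insert species cand, PySem.Set.add st.2 cand)
    | none =>
      let base := gs ++ '_' :: PySem.Chars.lower ep
      if PySem.Set.contains st.2 (String.ofList base) then
        let final := pvCounterA st.2 base 1 (st.2.length + 1)
        (st.1.insert species final, PySem.Set.add st.2 final)
      else (st.1.insert species (String.ofList base), PySem.Set.add st.2 (String.ofList base))

def make_unique_short_names (species_list : List String) : List (String × String) :=
  (species_list.foldl pvStepA (PySem.Dict.empty, PySem.Set.empty)).1.items

-- ===== PORT B =====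

-- one iteration of B's main loop: build the option set ({gs_ep[:n].lower()} plus the base name),
-- subtract used_names, take min(free, key=len); if free is empty, number the base name with the
-- smallest free suffix from range(1, len(used_names)+2).  Python's min over the set 'free' is
-- order-independent here because all options have pairwise distinct lengths (proved below); the
-- '.getD 1' default of the inner min is unreachable (the filtered range is nonempty — pigeonhole,
-- proved below), matching Python's min that never raises there.
def pvStepB (st : PySem.Dict String String × PySem.Set String) (species : String) :
    PySem.Dict String String × PySem.Set String :=
  let parts := PySem.Str.split₀ (PySem.Str.strip species)
  if parts.length < 2 then st
  else
    let gs := pvCapitalize (PySem.Chars.slice (parts.getD 0 "").toList none (some 3))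
    let ep := (parts.getD 1 "").toList
    let base := gs ++ '_' :: PySem.Chars.lower ep
    let options := PySem.Set.add
        (PySem.Set.ofList ((PySem.List.pyRange 3 (ep.length + 1) 1).map
          (fun n => pvJoinName gs (PySem.Chars.lower (PySem.Chars.slice ep none (some n))))))
        (String.ofList base)
    let free := PySem.Set.diff options st.2
    let name :=
      match PySem.List.min? free (fun s => PySem.Str.len s) with
      | some m => m
      | none =>
        String.ofList (base ++ '_' :: PySem.Int.toChars
          ((PySem.List.min?
              ((PySem.List.pyRange 1 ((st.2.length : Int) + 2) 1).filter
                (fun k => ! PySem.Set.contains st.2 (String.ofList (base ++ '_' :: PySem.Int.toChars k))))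
              (fun k => k)).getD 1))
    (st.1.insert species name, PySem.Set.add st.2 name)

def make_unique_short_names_alt (species_list : List String) : List (String × String) :=
  (species_list.foldl pvStepB (PySem.Dict.empty, PySem.Set.empty)).1.items

-- ===== PRECONDITION & SPEC =====
def Spec_make_unique_short_names (species_list : List String) (out : List (String × String)) : Prop := out = make_unique_short_names_alt species_list
instance (species_list : List String) (out : List (String × String)) : Decidable (Spec_make_unique_short_names species_list out) := by unfold Spec_make_unique_short_names; infer_instance

-- ===== CLAIM (what is proved, stated in full; the proofs are below) =====
def Claim_equal_make_unique_short_names : Prop := ∀ (species_list : List String), Dom_make_unique_short_names species_list → Spec_make_unique_short_names species_list (make_unique_short_names species_list)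

-- ===== LEMMAS AND PROOFS =====


theorem pv_digitChar_inj (a b : Nat) (ha : a < 10) (hb : b < 10)
    (h : Nat.digitChar a = Nat.digitChar b) : a = b := by
  interval_cases a <;> interval_cases b <;> simp_all [Nat.digitChar]

theorem pv_toDigits10_inj : ∀ (a b : Nat), Nat.toDigits 10 a = Nat.toDigits 10 b → a = b := by
  intro a
  induction a using Nat.strong_induction_on with
  | _ a ih =>
    intro b h
    by_cases ha : a < 10 <;> by_cases hb : b < 10
    · rw [Nat.toDigits_of_lt_base ha, Nat.toDigits_of_lt_base hb] at h
      exact pv_digitChar_inj a b ha hb (by simpa using h)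
    · have hB : Nat.toDigits 10 b = Nat.toDigits 10 (b/10) ++ [(b % 10).digitChar] := by
        conv_lhs => rw [Nat.toDigits_eq_if (by norm_num)]
        rw [if_neg hb]
      rw [Nat.toDigits_of_lt_base ha, hB] at h
      have hlen := congrArg List.length h
      simp only [List.length_append, List.length_cons, List.length_nil] at hlen
      have := @Nat.length_toDigits_pos 10 (b / 10)
      omega
    · have hA : Nat.toDigits 10 a = Nat.toDigits 10 (a/10) ++ [(a % 10).digitChar] := by
        conv_lhs => rw [Nat.toDigits_eq_if (by norm_num)]
        rw [if_neg ha]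
      rw [Nat.toDigits_of_lt_base hb, hA] at h
      have hlen := congrArg List.length h
      simp only [List.length_append, List.length_cons, List.length_nil] at hlen
      have := @Nat.length_toDigits_pos 10 (a / 10)
      omega
    · have hA : Nat.toDigits 10 a = Nat.toDigits 10 (a/10) ++ [(a % 10).digitChar] := by
        conv_lhs => rw [Nat.toDigits_eq_if (by norm_num)]
        rw [if_neg ha]
      have hB : Nat.toDigits 10 b = Nat.toDigits 10 (b/10) ++ [(b % 10).digitChar] := by
        conv_lhs => rw [Nat.toDigits_eq_if (by norm_num)]
        rw [if_neg hb]
      rw [hA, hB] at h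
      obtain ⟨h1, h2⟩ := List.append_inj' h (by simp)
      have hq : a / 10 = b / 10 := ih (a / 10) (by omega) _ h1
      have hr : a % 10 = b % 10 :=
        pv_digitChar_inj _ _ (Nat.mod_lt _ (by norm_num)) (Nat.mod_lt _ (by norm_num))
          (by simpa using h2)
      omega

theorem pv_toChars_inj (a b : Int) (ha : 0 ≤ a) (hb : 0 ≤ b)
    (h : PySem.Int.toChars a = PySem.Int.toChars b) : a = b := by
  unfold PySem.Int.toChars at h
  rw [if_neg (by omega), if_neg (by omega)] at h
  have := pv_toDigits10_inj _ _ h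
  omega

theorem pv_min?_keep {α : Type} (key : α → Int) (m : α) (t : List α)
    (h : ∀ y ∈ t, ¬ key y < key m) :
    t.foldl (fun acc x => match acc with
      | none => some x
      | some mm => if key x < key mm then some x else some mm) (some m) = some m := by
  induction t with
  | nil => rfl
  | cons y t ihh =>
    rw [List.foldl_cons]
    have : (if key y < key m then some y else some m) = some m :=
      if_neg (h y (List.mem_cons_self))
    simp only [this]
    exact ihh (fun z hz => h z (List.mem_cons_of_mem _ hz))

theorem pv_min?_eq_head? {α : Type} (key : α → Int) (l : List α)
    (h : l.Pairwise (fun a b => key a < key b)) :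
    PySem.List.min? l key = l.head? := by
  cases l with
  | nil => rfl
  | cons x t =>
    show (x :: t).foldl _ none = some x
    rw [List.foldl_cons]
    exact pv_min?_keep key x t (fun y hy => not_lt_of_gt ((List.pairwise_cons.1 h).1 y hy))

theorem pv_find?_ofList {α : Type} [BEq α] [LawfulBEq α] (p : α → Bool) (l : List α) :
    (PySem.Set.ofList l).find? p = l.find? p := by
  induction l using List.reverseRecOn with
  | nil => rfl
  | append_singleton xs x ih =>
    rw [PySem.Set.ofList_append_singleton, List.find?_append, ← ih, PySem.Set.add_eq_ite]
    by_cases hx : x ∈ PySem.Set.ofList xs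
    · rw [if_pos hx]
      cases hfind : (PySem.Set.ofList xs).find? p with
      | some c => simp
      | none =>
        have := List.find?_eq_none.1 hfind x hx
        simp [this]
    · rw [if_neg hx, List.find?_append]

theorem pv_pyRange_map (a : Int) (n : Nat) :
    PySem.List.pyRange a (a + n) 1 = (List.range n).map (fun k : Nat => a + (k : Int)) := by
  unfold PySem.List.pyRange
  rw [if_neg (by norm_num)]
  simp only [zero_lt_one, if_true]
  cases n with
  | zero => simp
  | succ m =>
    rw [if_pos (by push_cast; omega)]
    have : ((a + (m + 1 : Nat) - a + 1 - 1) / 1).toNat = m + 1 := by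
      push_cast; omega
    rw [this]
    simp only [one_mul]

theorem pv_pyRange_nil (a b : Int) (h : b ≤ a) : PySem.List.pyRange a b 1 = [] := by
  unfold PySem.List.pyRange
  rw [if_neg (by norm_num)]
  simp only [zero_lt_one, if_true]
  rw [if_neg (by omega)]
  simp

-- A's inner for/else loop is the first-unused scan over the prefix-candidate list
theorem pvTryA_eq_find? (gs ep : List Char) (used : PySem.Set String) (Ls : List Int) :
    pvTryA gs ep used Ls =
      (Ls.map (fun L => pvJoinName gs (PySem.Chars.lower (PySem.Chars.slice ep none (some L))))).find?
        (fun c => ! PySem.Set.contains used c) := by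
  induction Ls with
  | nil => rfl
  | cons L Ls ih =>
    rw [List.map_cons, List.find?_cons]
    cases h : PySem.Set.contains used (pvJoinName gs (PySem.Chars.lower (PySem.Chars.slice ep none (some L)))) with
    | true => simp only [pvTryA, h, Bool.not_true, if_true, ih]
    | false =>
      simp only [pvTryA, h, Bool.not_false]
      simp

-- A's counter while-loop is the first-unused scan over the numbered candidates, the
-- fuel-exhausted value being the default of the truncated scan
theorem pvCounterA_eq_find? (used : PySem.Set String) (base : List Char) (fuel : Nat) :
    ∀ c, pvCounterA used base c fuel =
      (((List.range fuel).map (fun k : Nat => String.ofList (base ++ '_' :: PySem.Int.toChars ((c + k : Nat) : Int)))).find?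
        (fun s => ! PySem.Set.contains used s)).getD
        (String.ofList (base ++ '_' :: PySem.Int.toChars ((c + fuel : Nat) : Int))) := by
  induction fuel with
  | zero => intro c; simp [pvCounterA]
  | succ n ih =>
    intro c
    rw [List.range_succ_eq_map, List.map_cons, List.find?_cons]
    cases h : PySem.Set.contains used (String.ofList (base ++ '_' :: PySem.Int.toChars ((c + 0 : Nat) : Int))) with
    | true =>
      have h' : PySem.Set.contains used (String.ofList (base ++ '_' :: PySem.Int.toChars (c : Int))) = true := by
        simpa using h
      simp only [Bool.not_true]
      show pvCounterA used base c (n+1) = _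
      rw [pvCounterA, if_pos h', ih (c + 1), List.map_map]
      have hm : (List.range n).map ((fun k : Nat => String.ofList (base ++ '_' :: PySem.Int.toChars ((c + k : Nat) : Int))) ∘ Nat.succ)
          = (List.range n).map (fun k : Nat => String.ofList (base ++ '_' :: PySem.Int.toChars ((c + 1 + k : Nat) : Int))) := by
        apply List.map_congr_left; intro k _
        simp only [Function.comp]
        have e : c + Nat.succ k = c + 1 + k := by omega
        rw [e]
      rw [hm]
      have e : c + (n + 1) = c + 1 + n := by omega
      rw [e]
    | false =>
      have h' : PySem.Set.contains used (String.ofList (base ++ '_' :: PySem.Int.toChars (c : Int))) = false := by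
        simpa using h
      simp only [Bool.not_false]
      show pvCounterA used base c (n+1) = _
      rw [pvCounterA, if_neg (by simp only [h']; decide), Option.getD_some]
      simp only [Nat.add_zero]

-- pigeonhole: among the |used|+1 numbered candidates base_1 .. base_|used|+1 (pairwise
-- distinct strings) at least one is not in used
theorem pv_exists_free (used : PySem.Set String) (base : List Char) :
    ∃ k ∈ List.range (used.length + 1),
      PySem.Set.contains used (String.ofList (base ++ '_' :: PySem.Int.toChars (1 + (k : Int)))) = false := by
  by_contra hcon
  push Not at hcon
  have hmem : ∀ k ∈ List.range (used.length + 1),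
      String.ofList (base ++ '_' :: PySem.Int.toChars (1 + (k : Int))) ∈ used := by
    intro k hk
    exact (PySem.Set.contains_iff used _).1 (Bool.ne_false_iff.1 (hcon k hk))
  have hnd : ((List.range (used.length + 1)).map
      (fun k : Nat => String.ofList (base ++ '_' :: PySem.Int.toChars (1 + (k : Int))))).Nodup := by
    apply List.Nodup.map_on _ List.nodup_range
    intro x _ y _ hxy
    have h1 := congrArg String.toList hxy
    simp only [String.toList_ofList] at h1
    have h2 := List.append_cancel_left h1
    have h3 : PySem.Int.toChars (1 + (x : Int)) = PySem.Int.toChars (1 + (y : Int)) := by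
      simpa using h2
    have := pv_toChars_inj _ _ (by omega) (by omega) h3
    omega
  have hsub : ((List.range (used.length + 1)).map
      (fun k : Nat => String.ofList (base ++ '_' :: PySem.Int.toChars (1 + (k : Int))))) ⊆ used := by
    intro s hs
    obtain ⟨k, hk, rfl⟩ := List.mem_map.1 hs
    exact hmem k hk
  have := (hnd.subperm hsub).length_le
  simp at this

-- A's counter loop equals B's "smallest free suffix from the bounded range" expression
theorem pv_counter_eq (used : PySem.Set String) (base : List Char) :
    pvCounterA used base 1 (used.length + 1) =
    String.ofList (base ++ '_' :: PySem.Int.toChars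
      ((PySem.List.min?
          ((PySem.List.pyRange 1 ((used.length : Int) + 2) 1).filter
            (fun k => ! PySem.Set.contains used (String.ofList (base ++ '_' :: PySem.Int.toChars k))))
          (fun k => k)).getD 1)) := by
  have hrange : PySem.List.pyRange 1 ((used.length : Int) + 2) 1
      = (List.range (used.length + 1)).map (fun k : Nat => 1 + (k : Int)) := by
    have h2 : (used.length : Int) + 2 = 1 + ((used.length + 1 : Nat) : Int) := by push_cast; ring
    rw [h2, pv_pyRange_map]
  rw [hrange, List.filter_map]
  -- the filtered mapped range is sorted, so min? is its head, i.e. the first hit of the scan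
  have hpw : ((List.filter ((fun k => ! PySem.Set.contains used (String.ofList (base ++ '_' :: PySem.Int.toChars k))) ∘ (fun k : Nat => 1 + (k : Int))) (List.range (used.length + 1))).map (fun k : Nat => 1 + (k : Int))).Pairwise
      (fun a b => (fun k => k) a < (fun k => k) b) := by
    rw [List.pairwise_map]
    exact (List.pairwise_lt_range.filter _).imp (fun h => by simpa using h)
  rw [pv_min?_eq_head? _ _ hpw, List.head?_map, List.head?_filter]
  rw [pvCounterA_eq_find? used base (used.length + 1) 1, List.find?_map]
  have hc : ((fun s => ! PySem.Set.contains used s) ∘ fun k : Nat =>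
        String.ofList (base ++ '_' :: PySem.Int.toChars ((1 + k : Nat) : Int)))
      = ((fun k => ! PySem.Set.contains used (String.ofList (base ++ '_' :: PySem.Int.toChars k))) ∘ (fun k : Nat => 1 + (k : Int))) := by
    funext k
    simp only [Function.comp]
    norm_num
  rw [hc]
  obtain ⟨k0, hk0, hfree⟩ := pv_exists_free used base
  cases hfind : List.find? ((fun k => ! PySem.Set.contains used (String.ofList (base ++ '_' :: PySem.Int.toChars k))) ∘ (fun k : Nat => 1 + (k : Int))) (List.range (used.length + 1)) with
  | none =>
    exfalso
    have := List.find?_eq_none.1 hfind k0 hk0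
    simp only [Function.comp, hfree] at this
    exact this rfl
  | some kk =>
    simp only [Option.map_some, Option.getD_some]
    norm_num

-- the length of a prefix candidate: |gs| + 1 + n for 0 ≤ n ≤ |ep|
theorem pv_len_f (gs ep : List Char) (n : Int) (h0 : 0 ≤ n) (hn : n ≤ ep.length) :
    PySem.Str.len (pvJoinName gs (PySem.Chars.lower (PySem.Chars.slice ep none (some n))))
      = (gs.length : Int) + 1 + n := by
  simp only [pvJoinName, PySem.Str.len, String.toList_ofList, List.length_append,
    List.length_cons, PySem.Chars.lower, List.length_map, PySem.Chars.slice_eq_listSlice,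
    PySem.List.slice_to _ h0, List.length_take]
  push_cast
  omega

-- B's min(free, key=len) equals the first-unused scan over prefixes-then-base
theorem pv_minfree_eq_find (gs ep : List Char) (used : PySem.Set String) :
    PySem.List.min?
      (PySem.Set.diff
        (PySem.Set.add
          (PySem.Set.ofList ((PySem.List.pyRange 3 (ep.length + 1) 1).map
            (fun n => pvJoinName gs (PySem.Chars.lower (PySem.Chars.slice ep none (some n))))))
          (String.ofList (gs ++ '_' :: PySem.Chars.lower ep))) used)
      (fun s => PySem.Str.len s)
    = ((PySem.List.pyRange 3 (ep.length + 1) 1).map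
        (fun n => pvJoinName gs (PySem.Chars.lower (PySem.Chars.slice ep none (some n))))
        ++ [String.ofList (gs ++ '_' :: PySem.Chars.lower ep)]).find?
        (fun c => ! PySem.Set.contains used c) := by
  rw [← PySem.Set.ofList_append_singleton]
  -- the option list has strictly increasing lengths
  have hpw : (PySem.Set.ofList ((PySem.List.pyRange 3 (ep.length + 1) 1).map
        (fun n => pvJoinName gs (PySem.Chars.lower (PySem.Chars.slice ep none (some n))))
        ++ [String.ofList (gs ++ '_' :: PySem.Chars.lower ep)])).Pairwise
      (fun a b => PySem.Str.len a < PySem.Str.len b) := by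
    by_cases hL : 3 ≤ ep.length
    · -- the prefix list is a map over range (|ep| - 2), with strictly increasing lengths,
      -- and the base name is its last element
      have h3 : (ep.length : Int) + 1 = 3 + ((ep.length - 2 : Nat) : Int) := by omega
      have hmap : (PySem.List.pyRange 3 (ep.length + 1) 1).map
            (fun n => pvJoinName gs (PySem.Chars.lower (PySem.Chars.slice ep none (some n))))
          = (List.range (ep.length - 2)).map
            ((fun n => pvJoinName gs (PySem.Chars.lower (PySem.Chars.slice ep none (some n)))) ∘
              (fun k : Nat => 3 + (k : Int))) := by
        rw [h3, pv_pyRange_map, List.map_map]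
      have hpwpre : ((List.range (ep.length - 2)).map
            ((fun n => pvJoinName gs (PySem.Chars.lower (PySem.Chars.slice ep none (some n)))) ∘
              (fun k : Nat => 3 + (k : Int)))).Pairwise
            (fun a b => PySem.Str.len a < PySem.Str.len b) := by
        rw [List.pairwise_map]
        refine List.pairwise_lt_range.imp_of_mem ?_
        intro a b ha hb hab
        simp only [List.mem_range] at ha hb
        simp only [Function.comp]
        rw [pv_len_f gs ep _ (by omega) (by omega), pv_len_f gs ep _ (by omega) (by omega)]
        omega
      have hbmem : String.ofList (gs ++ '_' :: PySem.Chars.lower ep)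
          ∈ (List.range (ep.length - 2)).map
            ((fun n => pvJoinName gs (PySem.Chars.lower (PySem.Chars.slice ep none (some n)))) ∘
              (fun k : Nat => 3 + (k : Int))) := by
        refine List.mem_map.2 ⟨ep.length - 3, List.mem_range.2 (by omega), ?_⟩
        simp only [Function.comp]
        have he : (3 + ((ep.length - 3 : Nat) : Int)) = (ep.length : Int) := by omega
        rw [he]
        simp only [pvJoinName, PySem.Chars.slice_eq_listSlice,
          PySem.List.slice_to _ (by positivity : (0:Int) ≤ ep.length), Int.toNat_natCast,
          List.take_length]
      have hnd : ((List.range (ep.length - 2)).map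
            ((fun n => pvJoinName gs (PySem.Chars.lower (PySem.Chars.slice ep none (some n)))) ∘
              (fun k : Nat => 3 + (k : Int)))).Nodup :=
        hpwpre.imp (fun h he => by rw [he] at h; exact lt_irrefl _ h)
      rw [hmap, PySem.Set.ofList_append_singleton,
        PySem.Set.add_of_mem ((PySem.Set.mem_ofList _ _).2 hbmem),
        PySem.Set.ofList_eq_self_of_nodup _ hnd]
      exact hpwpre
    · rw [pv_pyRange_nil _ _ (by omega : (ep.length : Int) + 1 ≤ 3)]
      rw [List.map_nil, List.nil_append,
        PySem.Set.ofList_eq_self_of_nodup _ (List.nodup_singleton _)]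
      exact List.pairwise_singleton _ _
  show PySem.List.min? (List.filter (fun x => ! PySem.Set.contains used x) _) _ = _
  rw [pv_min?_eq_head? _ _ (hpw.filter _), List.head?_filter, pv_find?_ofList]

set_option maxHeartbeats 1000000 in
-- the two loop bodies agree on every state and species
theorem pvStep_eq (st : PySem.Dict String String × PySem.Set String) (species : String) :
    pvStepA st species = pvStepB st species := by
  unfold pvStepA pvStepB
  by_cases hlen : (PySem.Str.split₀ (PySem.Str.strip species)).length < 2
  · rw [if_pos hlen, if_pos hlen]
  · rw [if_neg hlen, if_neg hlen]
    dsimp only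
    rw [pvTryA_eq_find?, pv_minfree_eq_find, List.find?_append]
    cases hfind : ((PySem.List.pyRange 3 ((((PySem.Str.split₀ (PySem.Str.strip species)).getD 1 "").toList).length + 1) 1).map
        (fun L => pvJoinName (pvCapitalize (PySem.Chars.slice ((PySem.Str.split₀ (PySem.Str.strip species)).getD 0 "").toList none (some 3)))
          (PySem.Chars.lower (PySem.Chars.slice (((PySem.Str.split₀ (PySem.Str.strip species)).getD 1 "").toList) none (some L))))).find?
        (fun c => ! PySem.Set.contains st.2 c) with
    | some cand => simp only [Option.some_or]
    | none =>
      simp only [Option.none_or, List.find?_singleton]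
      cases hbase : PySem.Set.contains st.2 (String.ofList
          ((pvCapitalize (PySem.Chars.slice ((PySem.Str.split₀ (PySem.Str.strip species)).getD 0 "").toList none (some 3)))
            ++ '_' :: PySem.Chars.lower (((PySem.Str.split₀ (PySem.Str.strip species)).getD 1 "").toList))) with
      | false => simp
      | true => rw [pv_counter_eq]; simp

-- the two folds agree
theorem pvFoldl_eq (xs : List String) (st : PySem.Dict String String × PySem.Set String) :
    xs.foldl pvStepA st = xs.foldl pvStepB st := by
  induction xs generalizing st with
  | nil => rw [List.foldl_nil, List.foldl_nil]
  | cons x xs ih => rw [List.foldl_cons, List.foldl_cons, pvStep_eq]; exact ih _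

-- ===== VERDICT (by name: the statement is the Claim_ definition above) =====
theorem make_unique_short_names_spec : Claim_equal_make_unique_short_names := by
  intro xs _
  show make_unique_short_names xs = make_unique_short_names_alt xs
  exact congrArg (fun st => st.1.items) (pvFoldl_eq xs (PySem.Dict.empty, PySem.Set.empty))
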